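-- pv_equiv track=rewrite | github.com/fdf-uni/s2s | sums_of_two_squares.py | rep_prime_power
-- ===== SOURCE A (Python) =====
-- def rep_prod(a, b, c, d):
--     """
--     Get representations of (a^2 + b^2)*(c^2 + b^2) as a sum of two squares.
--     Applies the Brahmagupta-Fibonacci (BF) formula.
--     """
--     s = [
--         tuple(sorted([abs(a * c + b * d), abs(a * d - b * c)])),
--         tuple(sorted([abs(a * c - b * d), abs(a * d + b * c)])),
--     ]
--     # Remove possible duplicates
--     return s if s[0] != s[1] else [s[0]]
--
-- def rep_prime_power(representation_of_p, n):
--     """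
--     Get representations of p^n as a sum of two squares, given that of p.
--     Assumes that p is a prime which is equal to 2 or of the form 4 k + 1.
--     """
--     r0 = representation_of_p
--     rep_p = [r0]
--     for i in range(n - 1):
--         new_rep = []
--         for r in rep_p:
--             new_rep += rep_prod(r[0], r[1], *r0)
--             rep_p = new_rep
--     return rep_p
-- ===== SOURCE B (Python) =====
-- def rep_prod(a, b, c, d):
--     s = [
--         tuple(sorted([abs(a * c + b * d), abs(a * d - b * c)])),
--         tuple(sorted([abs(a * c - b * d), abs(a * d + b * c)])),
--     ]
--     return s if s[0] != s[1] else [s[0]]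
--
-- def rep_prime_power(representation_of_p, n):
--     r0 = representation_of_p
--     out = []
--     stack = [(r0, n - 1)]
--     while stack:
--         r, depth = stack.pop()
--         if depth <= 0:
--             out.append(r)
--         else:
--             for child in reversed(rep_prod(r[0], r[1], *r0)):
--                 stack.append((child, depth - 1))
--     return out
-- ===== Notes on version B (the rewrite author's own statement) =====
-- stated objective: alternative
-- what changed: Replaces the level-by-level breadth-first accumulation (rebuilding the whole representation list n-1 times) with a depth-first recursion over the expansion tree that concatenates the expansions of each child; leaf order coincides because all leaves sit at uniform depth.
import Mathlib
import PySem

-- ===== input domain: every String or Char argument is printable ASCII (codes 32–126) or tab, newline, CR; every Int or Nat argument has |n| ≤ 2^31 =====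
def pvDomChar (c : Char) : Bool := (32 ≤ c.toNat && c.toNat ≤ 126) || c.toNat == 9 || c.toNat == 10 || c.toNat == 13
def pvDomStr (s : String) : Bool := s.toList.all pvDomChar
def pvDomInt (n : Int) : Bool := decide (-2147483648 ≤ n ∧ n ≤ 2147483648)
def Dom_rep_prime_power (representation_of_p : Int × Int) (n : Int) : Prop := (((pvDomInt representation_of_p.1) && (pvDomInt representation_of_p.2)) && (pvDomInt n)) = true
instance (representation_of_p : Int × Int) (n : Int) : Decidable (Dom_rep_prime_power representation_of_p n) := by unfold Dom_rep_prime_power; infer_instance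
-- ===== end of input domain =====

-- B replaces A's level-by-level breadth-first accumulation with an explicit-stack
-- depth-first traversal of the expansion tree (objective: alternative decomposition).


-- ===== PORT A =====
-- shared same-module helper rep_prod; Python's abs on an int is exactly
-- 'if x < 0 then -x else x', and sorted on a two-element list is exactly
-- 'if x ≤ y then [x, y] else [y, x]' (stability irrelevant for two ints)
def pyAbs (x : Int) : Int := if x < 0 then -x else x

def sort2 (x y : Int) : Int × Int := if x ≤ y then (x, y) else (y, x)

def rep_prod (a b c d : Int) : List (Int × Int) :=
  let p1 := sort2 (pyAbs (a * c + b * d)) (pyAbs (a * d - b * c))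
  let p2 := sort2 (pyAbs (a * c - b * d)) (pyAbs (a * d + b * c))
  if p1 ≠ p2 then [p1, p2] else [p1]

-- literal port of A: for i in range(n-1): rebuild new_rep over rep_p,
-- reassigning rep_p inside the inner loop (state = (new_rep, rep_p))
def rep_prime_power (representation_of_p : Int × Int) (n : Int) : List (Int × Int) :=
  let r0 := representation_of_p
  (PySem.List.pyRange 0 (n - 1) 1).foldl
    (fun rep_p _ =>
      (rep_p.foldl
        (fun (st : List (Int × Int) × List (Int × Int)) r =>
          let new_rep := st.1 ++ rep_prod r.1 r.2 r0.1 r0.2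
          (new_rep, new_rep))
        ([], rep_p)).2)
    [r0]

-- ===== PORT B =====
-- pushing elements one by one prepends them reversed (cited by dfsLoop's termination)
theorem pvPush_eq (f : (Int × Int) → (Int × Int) × Int) (l : List (Int × Int)) :
    ∀ (acc : List ((Int × Int) × Int)),
      l.foldl (fun st c => f c :: st) acc = (l.map f).reverse ++ acc := by
  induction l with
  | nil => intro acc; simp
  | cons h t ih => intro acc; simp [List.foldl_cons, ih]

theorem pvRep_prod_len (a b c d : Int) : (rep_prod a b c d).length ≤ 2 := by
  simp only [rep_prod]
  split <;> simp

def pvMeasure (stack : List ((Int × Int) × Int)) : Nat :=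
  (stack.map (fun rd => 3 ^ (rd.2.toNat + 1))).sum

-- literal port of Source B's while loop: stack of (representation, depth), top = head;
-- pushing reversed(rep_prod ...) one by one = prepending the children in order
def dfsLoop (r0 : Int × Int) (stack : List ((Int × Int) × Int)) (out : List (Int × Int)) : List (Int × Int) :=
  match stack with
  | [] => out
  | (r, depth) :: rest =>
    if depth ≤ 0 then dfsLoop r0 rest (out ++ [r])
    else dfsLoop r0
      ((rep_prod r.1 r.2 r0.1 r0.2).reverse.foldl (fun st c => (c, depth - 1) :: st) rest)
      out
termination_by pvMeasure stack
decreasing_by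
  · simp only [pvMeasure, List.map_cons, List.sum_cons]
    have h1 : 1 ≤ 3 ^ (depth.toNat + 1) := Nat.one_le_pow _ _ (by norm_num)
    omega
  · rename_i hd
    rw [pvPush_eq, List.map_reverse, List.reverse_reverse]
    simp only [pvMeasure, List.map_append, List.map_map, List.map_cons, List.sum_cons,
      List.sum_append]
    have hlen : ((rep_prod r.1 r.2 r0.1 r0.2).map
        ((fun rd => 3 ^ (rd.2.toNat + 1)) ∘ (fun c => (c, depth - 1)))).sum
        = (rep_prod r.1 r.2 r0.1 r0.2).length * 3 ^ ((depth - 1).toNat + 1) := by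
      rw [show ((fun rd : (Int × Int) × Int => 3 ^ (rd.2.toNat + 1)) ∘ (fun c : Int × Int => (c, depth - 1)))
            = (fun _ : Int × Int => 3 ^ ((depth - 1).toNat + 1)) from rfl]
      rw [List.map_const', List.sum_replicate, smul_eq_mul]
    rw [hlen]
    have h2 : (rep_prod r.1 r.2 r0.1 r0.2).length ≤ 2 := pvRep_prod_len _ _ _ _
    have h3 : (depth - 1).toNat + 1 = depth.toNat := by omega
    rw [h3, pow_succ]
    have h4 : 1 ≤ 3 ^ depth.toNat := Nat.one_le_pow _ _ (by norm_num)
    nlinarith [h2, h4]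

def rep_prime_power_alt (representation_of_p : Int × Int) (n : Int) : List (Int × Int) :=
  dfsLoop representation_of_p [(representation_of_p, n - 1)] []

-- ===== PRECONDITION & SPEC =====
def Spec_rep_prime_power (representation_of_p : Int × Int) (n : Int) (out : List (Int × Int)) : Prop := out = rep_prime_power_alt representation_of_p n
instance (representation_of_p : Int × Int) (n : Int) (out : List (Int × Int)) : Decidable (Spec_rep_prime_power representation_of_p n out) := by unfold Spec_rep_prime_power; infer_instance

-- ===== CLAIM (what is proved, stated in full; the proofs are below) =====
def Claim_equal_rep_prime_power : Prop := ∀ (representation_of_p : Int × Int) (n : Int), Dom_rep_prime_power representation_of_p n → Spec_rep_prime_power representation_of_p n (rep_prime_power representation_of_p n)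

-- ===== LEMMAS AND PROOFS =====

-- one "step" of the expansion
def pvStep (r0 r : Int × Int) : List (Int × Int) := rep_prod r.1 r.2 r0.1 r0.2

-- the uniform-depth expansion of one representation (proof-side characterisation)
def expand (r0 : Int × Int) (r : Int × Int) (depth : Int) : List (Int × Int) :=
  if depth ≤ 0 then [r]
  else (rep_prod r.1 r.2 r0.1 r0.2).flatMap (fun c => expand r0 c (depth - 1))
termination_by depth.toNat
decreasing_by omega

-- the stack loop emits, in order, the expansion of every stack entry
theorem pvDfs_eq (r0 : Int × Int) :
    ∀ (stack : List ((Int × Int) × Int)) (out : List (Int × Int)),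
      dfsLoop r0 stack out = out ++ stack.flatMap (fun rd => expand r0 rd.1 rd.2) := by
  intro stack out
  induction stack, out using dfsLoop.induct r0 with
  | case1 out => simp [dfsLoop]
  | case2 r depth rest out hd ih =>
      rw [dfsLoop]
      simp only [hd, if_true, ih, List.flatMap_cons]
      rw [expand]
      simp [hd]
  | case3 r depth rest out hd ih =>
      rw [dfsLoop]
      simp only [hd, if_false, ih]
      rw [pvPush_eq, List.map_reverse, List.reverse_reverse, List.flatMap_cons,
        List.flatMap_append, List.flatMap_map]
      rw [expand]
      simp [hd, List.append_assoc]

-- the inner Python loop's pair-state fold, characterised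
theorem pvInner_pair (r0 : Int × Int) (L : List (Int × Int)) :
    ∀ (acc x : List (Int × Int)),
      (L.foldl
        (fun (st : List (Int × Int) × List (Int × Int)) r =>
          let new_rep := st.1 ++ rep_prod r.1 r.2 r0.1 r0.2
          (new_rep, new_rep))
        (acc, x))
      = (acc ++ L.flatMap (pvStep r0), if L = [] then x else acc ++ L.flatMap (pvStep r0)) := by
  induction L with
  | nil => intro acc x; simp
  | cons h t ih =>
      intro acc x
      simp only [List.foldl_cons, ih, List.flatMap_cons]
      simp only [Prod.mk.injEq]
      constructor
      · simp [pvStep, List.append_assoc]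
      · by_cases ht : t = [] <;> simp [ht, pvStep, List.append_assoc]

theorem pvInner_eq (r0 : Int × Int) (L : List (Int × Int)) :
    (L.foldl
        (fun (st : List (Int × Int) × List (Int × Int)) r =>
          let new_rep := st.1 ++ rep_prod r.1 r.2 r0.1 r0.2
          (new_rep, new_rep))
        ([], L)).2 = L.flatMap (pvStep r0) := by
  rw [pvInner_pair]
  by_cases hL : L = [] <;> simp [hL]

-- a foldl that ignores its elements is function iteration
theorem pvFoldl_const {α β : Type} (f : β → β) (l : List α) :
    ∀ (init : β), l.foldl (fun b _ => f b) init = f^[l.length] init := by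
  induction l with
  | nil => intro init; simp
  | cons h t ih => intro init; simp [List.foldl_cons, ih, Function.iterate_succ_apply]

-- BFS level iteration = concatenation of uniform-depth expansions
theorem pvIter_eq_expand (r0 : Int × Int) (k : Nat) :
    ∀ (L : List (Int × Int)),
      (fun M => M.flatMap (pvStep r0))^[k] L = L.flatMap (fun r => expand r0 r (k : Int)) := by
  induction k with
  | zero =>
      intro L
      simp [expand]
  | succ k ih =>
      intro L
      rw [Function.iterate_succ_apply, ih, List.flatMap_assoc]
      apply List.flatMap_congr
      intro r _
      rw [expand]
      have h1 : ¬ ((k : Int) + 1 ≤ 0) := by omega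
      have h2 : ((k : Int) + 1) - 1 = (k : Int) := by ring
      simp only [Nat.cast_add, Nat.cast_one, h1, if_false, h2, pvStep]

theorem pvExpand_toNat (r0 r : Int × Int) (d : Int) :
    expand r0 r ((d.toNat : Nat) : Int) = expand r0 r d := by
  by_cases hd : d ≤ 0
  · have : d.toNat = 0 := by omega
    rw [this]; rw [expand, expand]; simp [hd]
  · have : ((d.toNat : Nat) : Int) = d := by omega
    rw [this]

-- ===== VERDICT (by name: the statement is the Claim_ definition above) =====
theorem rep_prime_power_spec : Claim_equal_rep_prime_power := by
  intro r0 n _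
  unfold Spec_rep_prime_power rep_prime_power rep_prime_power_alt
  have hbody :
      (fun (rep_p : List (Int × Int)) (_ : Int) =>
        (rep_p.foldl
          (fun (st : List (Int × Int) × List (Int × Int)) r =>
            let new_rep := st.1 ++ rep_prod r.1 r.2 r0.1 r0.2
            (new_rep, new_rep))
          ([], rep_p)).2)
      = (fun (rep_p : List (Int × Int)) (_ : Int) => rep_p.flatMap (pvStep r0)) := by
    funext rep_p i
    exact pvInner_eq r0 rep_p
  simp only [hbody]
  rw [pvFoldl_const, pvIter_eq_expand, PySem.List.length_pyRange_one, pvDfs_eq]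
  have h0 : n - 1 - 0 = n - 1 := by ring
  rw [h0]
  simp only [List.flatMap_cons, List.flatMap_nil, List.append_nil, List.nil_append]
  exact pvExpand_toNat r0 r0 (n - 1)
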